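-- pv_equiv track=rewrite | github.com/cadia-lvl/althingi-asr | s5/local/new_speeches/concordance_of_new_vocab.py | find_concordance
-- ===== SOURCE A (Python) =====
-- def find_concordance(textlist, vocabulary):
--
--     l = len(textlist)
--     d=[]
--     for word in vocabulary:
--         i=[word]
--         pos = textlist.index(word)
--         if pos < 6 and pos > l-7:
--             i.append(' '.join(textlist))
--         elif pos < 6:
--             i.append(' '.join(textlist[:pos+7]))
--         elif pos > l-7:
--             i.append(' '.join(textlist[pos-6:]))
--         else:
--             i.append(' '.join(textlist[pos-6:pos+6]))
--         d.append('\t'.join(i))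
--     return d
-- ===== SOURCE B (Python) =====
-- def find_concordance(textlist, vocabulary):
--     # Single left-to-right scan of textlist: at each word's FIRST occurrence (if it is a
--     # wanted vocab word) the snippet is cut immediately with unified lo/hi window bounds;
--     # the answer lines are then assembled in vocabulary order from the collected snippets.
--     want = set(vocabulary)
--     l = len(textlist)
--     snip = {}
--     for pos, w in enumerate(textlist):
--         if w in want and w not in snip:
--             lo = 0 if pos < 6 else pos - 6
--             hi = l if pos > l - 7 else (pos + 7 if pos < 6 else pos + 6)
--             snip[w] = ' '.join(textlist[lo:hi])
--     return [word + '\t' + snip[word] for word in vocabulary]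
-- ===== Notes on version B (the rewrite author's own statement) =====
-- stated objective: alternative
-- what changed: B inverts the iteration: a single enumerate scan of textlist cuts each snippet immediately at a wanted word's first occurrence using unified arithmetic lo/hi window bounds (replacing A's per-vocabulary-word textlist.index scan and four-way branch), and the output lines are then assembled in vocabulary order from the collected snippets.
-- outside the precondition, e.g. on find_concordance(['a', 'b'], ['c']): A raises ValueError, B raises KeyError
import Mathlib
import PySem

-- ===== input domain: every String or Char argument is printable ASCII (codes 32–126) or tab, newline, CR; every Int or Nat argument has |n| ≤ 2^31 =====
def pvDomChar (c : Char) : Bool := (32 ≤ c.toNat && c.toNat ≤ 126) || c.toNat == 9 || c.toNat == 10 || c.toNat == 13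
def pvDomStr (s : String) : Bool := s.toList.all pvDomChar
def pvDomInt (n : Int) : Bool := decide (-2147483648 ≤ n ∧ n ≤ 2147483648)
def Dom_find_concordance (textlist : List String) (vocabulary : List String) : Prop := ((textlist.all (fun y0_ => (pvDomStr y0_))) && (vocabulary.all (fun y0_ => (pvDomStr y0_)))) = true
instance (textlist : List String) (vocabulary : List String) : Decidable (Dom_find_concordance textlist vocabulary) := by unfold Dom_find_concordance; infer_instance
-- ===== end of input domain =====

-- B scans textlist once, cutting each snippet at the word's first occurrence with unified
-- lo/hi window bounds, then assembles the lines in vocabulary order; objective: alternative.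


-- ===== PORT A =====
-- textlist.index(word) raises ValueError when word ∉ textlist; Pre_ excludes that, so the
-- `.getD 0` default is never reached on admitted inputs.
def find_concordance (textlist : List String) (vocabulary : List String) : List String :=
  let l : Int := (textlist.length : Int)
  vocabulary.foldl (fun d word =>
    let i : List String := [word]
    let pos : Int := (((PySem.List.index? textlist word).getD 0 : Nat) : Int)
    let i : List String :=
      if pos < 6 ∧ pos > l - 7 then
        i ++ [PySem.Str.join " " textlist]
      else if pos < 6 then
        i ++ [PySem.Str.join " " (PySem.List.slice textlist none (some (pos + 7)))]
      else if pos > l - 7 then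
        i ++ [PySem.Str.join " " (PySem.List.slice textlist (some (pos - 6)) none)]
      else
        i ++ [PySem.Str.join " " (PySem.List.slice textlist (some (pos - 6)) (some (pos + 6)))]
    d ++ [PySem.Str.join "\t" i]) []

-- ===== PORT B =====
-- B-side helper: the body of `snip[w] = ' '.join(textlist[lo:hi])` — the snippet cut around
-- position pos with B's unified lo/hi bounds.
def fcSnip (full : List String) (pos : Nat) : String :=
  let l : Int := (full.length : Int)
  let lo : Int := if (pos : Int) < 6 then 0 else (pos : Int) - 6
  let hi : Int :=
    if (pos : Int) > l - 7 then l
    else if (pos : Int) < 6 then (pos : Int) + 7 else (pos : Int) + 6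
  PySem.Str.join " " (PySem.List.slice full (some lo) (some hi))

-- B-side helper: the `for pos, w in enumerate(textlist): if w in want and w not in snip: …` scan.
def fcScan (full : List String) (want : PySem.Set String) :
    List String → Nat → PySem.Dict String String → PySem.Dict String String
  | [], _, snip => snip
  | w :: ws, pos, snip =>
      fcScan full want ws (pos + 1)
        (if PySem.Set.contains want w && !(PySem.Dict.get? snip w).isSome
         then PySem.Dict.insert snip w (fcSnip full pos) else snip)

-- snip[word] raises KeyError when word ∉ textlist; Pre_ excludes that, so the
-- `.getD ""` default is never reached on admitted inputs.
def find_concordance_alt (textlist : List String) (vocabulary : List String) : List String :=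
  let want : PySem.Set String := PySem.Set.ofList vocabulary
  let snip := fcScan textlist want textlist 0 PySem.Dict.empty
  vocabulary.map (fun word => word ++ "\t" ++ (PySem.Dict.get? snip word).getD "")

-- ===== PRECONDITION & SPEC =====
-- Pre_ excludes vocabulary words absent from textlist: there A raises ValueError (B raises KeyError).
def Pre_find_concordance (textlist : List String) (vocabulary : List String) : Prop :=
  ∀ w ∈ vocabulary, w ∈ textlist
instance (textlist : List String) (vocabulary : List String) : Decidable (Pre_find_concordance textlist vocabulary) := by unfold Pre_find_concordance; infer_instance

def pvWitness_find_concordance : List String × List String :=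
  (["the", "quick", "brown", "fox"], ["brown", "the"])

def Spec_find_concordance (textlist : List String) (vocabulary : List String) (out : List String) : Prop := out = find_concordance_alt textlist vocabulary
instance (textlist : List String) (vocabulary : List String) (out : List String) : Decidable (Spec_find_concordance textlist vocabulary out) := by unfold Spec_find_concordance; infer_instance

-- ===== CLAIM (what is proved, stated in full; the proofs are below) =====
def Claim_equal_find_concordance : Prop := ∀ (textlist : List String) (vocabulary : List String), Dom_find_concordance textlist vocabulary → Pre_find_concordance textlist vocabulary → Spec_find_concordance textlist vocabulary (find_concordance textlist vocabulary)

-- ===== LEMMAS AND PROOFS =====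

-- The scan's dictionary answers the first occurrence snippet of any wanted word, shifted by
-- the running start position pos, relative to an accumulator snip.
theorem fcScan_get (full : List String) (want : PySem.Set String)
    (ts : List String) (pos : Nat) (snip : PySem.Dict String String) (w : String)
    (hw : w ∈ want) :
    PySem.Dict.get? (fcScan full want ts pos snip) w
      = ((PySem.Dict.get? snip w).or
          ((PySem.List.index? ts w).map (fun k => fcSnip full (k + pos)))) := by
  induction ts generalizing pos snip with
  | nil => simp [fcScan, PySem.List.index?_eq_idxOf?]
  | cons t ts ih =>
      rw [fcScan, ih]
      by_cases htw : t = w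
      · subst htw
        rw [PySem.List.index?_cons_self, (PySem.Set.contains_iff want t).mpr hw]
        cases hd : PySem.Dict.get? snip t with
        | some v => simp [hd]
        | none => simp [PySem.Dict.get?_insert_self]
      · rw [PySem.List.index?_cons_of_ne ts htw]
        have hne : PySem.Dict.get?
            (if PySem.Set.contains want t && !(PySem.Dict.get? snip t).isSome
             then PySem.Dict.insert snip t (fcSnip full pos) else snip) w
            = PySem.Dict.get? snip w := by
          split
          · exact PySem.Dict.get?_insert_of_ne snip (fcSnip full pos) (fun h => htw h.symm)
          · rfl
        rw [hne]
        cases PySem.Dict.get? snip w with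
        | some v => simp [Option.or]
        | none =>
            cases PySem.List.index? ts w with
            | none => simp [Option.or]
            | some k => simp [Option.or]; congr 1; omega

theorem fc_join_tab (w s : String) : PySem.Str.join "\t" [w, s] = w ++ "\t" ++ s := by
  apply String.toList_injective
  simp [PySem.Str.join, PySem.Chars.join, List.intercalate]

-- A's four-way branch computes exactly B's lo/hi snippet at the word's index.
theorem fc_branch_eq (textlist : List String) (k : Nat) (hkl : k < textlist.length) :
    (let l : Int := (textlist.length : Int)
     let pos : Int := ((k : Nat) : Int)
     if pos < 6 ∧ pos > l - 7 then
       PySem.Str.join " " textlist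
     else if pos < 6 then
       PySem.Str.join " " (PySem.List.slice textlist none (some (pos + 7)))
     else if pos > l - 7 then
       PySem.Str.join " " (PySem.List.slice textlist (some (pos - 6)) none)
     else
       PySem.Str.join " " (PySem.List.slice textlist (some (pos - 6)) (some (pos + 6))))
    = fcSnip textlist k := by
  simp only [fcSnip]
  by_cases h6 : ((k : Nat) : Int) < 6
  · by_cases h7 : ((k : Nat) : Int) > (textlist.length : Int) - 7
    · rw [if_pos ⟨h6, h7⟩, if_pos h6, if_pos h7]
      congr 1
      rw [PySem.List.slice_zero_start, PySem.List.slice_to textlist (by omega)]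
      exact (List.take_of_length_le (by omega)).symm
    · rw [if_neg (by tauto), if_pos h6, if_pos h6, if_neg h7, if_pos h6,
        PySem.List.slice_zero_start]
  · by_cases h7 : ((k : Nat) : Int) > (textlist.length : Int) - 7
    · rw [if_neg (by tauto), if_neg h6, if_pos h7, if_neg h6, if_pos h7]
      congr 1
      have hk6 : ((k : Nat) : Int) - 6 = ((k - 6 : Nat) : Int) := by omega
      rw [hk6, PySem.List.slice_from_natCast, PySem.List.slice_natCast,
        List.take_of_length_le (by simp)]
    · have hA : ¬(((k : Nat) : Int) < 6 ∧ ((k : Nat) : Int) > (textlist.length : Int) - 7) := by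
        tauto
      simp only [if_neg hA, if_neg h6, if_neg h7]

-- Per-word agreement of A's loop body with B's dictionary lookup.
theorem fc_word_eq (textlist : List String) (vocabulary : List String) (word : String)
    (hw : word ∈ textlist) (hv : word ∈ vocabulary) :
    (let l : Int := (textlist.length : Int)
     let i : List String := [word]
     let pos : Int := (((PySem.List.index? textlist word).getD 0 : Nat) : Int)
     let i : List String :=
       if pos < 6 ∧ pos > l - 7 then
         i ++ [PySem.Str.join " " textlist]
       else if pos < 6 then
         i ++ [PySem.Str.join " " (PySem.List.slice textlist none (some (pos + 7)))]
       else if pos > l - 7 then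
         i ++ [PySem.Str.join " " (PySem.List.slice textlist (some (pos - 6)) none)]
       else
         i ++ [PySem.Str.join " " (PySem.List.slice textlist (some (pos - 6)) (some (pos + 6)))]
     PySem.Str.join "\t" i)
    = word ++ "\t" ++
        (PySem.Dict.get?
          (fcScan textlist (PySem.Set.ofList vocabulary) textlist 0 PySem.Dict.empty)
          word).getD "" := by
  have hget : PySem.Dict.get?
      (fcScan textlist (PySem.Set.ofList vocabulary) textlist 0 PySem.Dict.empty) word
      = (PySem.List.index? textlist word).map (fun k => fcSnip textlist (k + 0)) := by
    rw [fcScan_get textlist _ textlist 0 PySem.Dict.empty word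
      ((PySem.Set.mem_ofList vocabulary word).mpr hv)]
    simp [PySem.Dict.get?, PySem.Dict.empty]
  obtain ⟨k, hk⟩ := Option.isSome_iff_exists.mp
    ((PySem.List.index?_isSome_iff textlist word).mpr hw)
  have hkl : k < textlist.length := by
    obtain ⟨hlt, -, -⟩ := PySem.List.getElem_of_index?_eq_some hk
    exact hlt
  rw [hget, hk]
  simp only [Option.map_some, Option.getD_some, Nat.add_zero]
  rw [← fc_branch_eq textlist k hkl, ← fc_join_tab]
  simp only [List.singleton_append]
  by_cases h6 : ((k : Nat) : Int) < 6
  · by_cases h7 : ((k : Nat) : Int) > (textlist.length : Int) - 7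
    · rw [if_pos ⟨h6, h7⟩, if_pos ⟨h6, h7⟩]
    · rw [if_neg (by tauto), if_pos h6, if_neg (by tauto), if_pos h6]
  · by_cases h7 : ((k : Nat) : Int) > (textlist.length : Int) - 7
    · rw [if_neg (by tauto), if_neg h6, if_pos h7, if_neg (by tauto), if_neg h6, if_pos h7]
    · rw [if_neg (by tauto), if_neg h6, if_neg h7, if_neg (by tauto), if_neg h6, if_neg h7]

-- ===== VERDICT (by name: the statement is the Claim_ definition above) =====
theorem find_concordance_spec : Claim_equal_find_concordance := by
  intro textlist vocabulary _ hpre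
  unfold Spec_find_concordance find_concordance find_concordance_alt
  simp only
  rw [PySem.List.foldl_append_singleton_eq_map]
  apply List.map_congr_left
  intro word hword
  exact fc_word_eq textlist vocabulary word (hpre word hword) hword
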